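-- pv_equiv track=rewrite | github.com/HugoRochartk/OML-Projeto | CLog_Dual_ComKernel/CLogDKPd_MGE.py | build_dp_matrix
-- ===== SOURCE A (Python) =====
-- def dot_product(t1, t2):
--     if len(t1) == len(t2):
--         return sum(t1[i] * t2[i] for i in range(len(t1)))
--     else:
--         raise ValueError(f"Dot Product: {t1} and {t2} do not have the same length.")
--
-- def build_dp_matrix(x, N, d):
--     matrix = []
--
--     for i in range(N):
--         line = []
--         for j in range(N):
--             line.append((1 + dot_product(x[i], x[j])) ** d)
--         matrix.append(line)
--
--     return matrix
-- ===== SOURCE B (Python) =====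
-- def dot_product(t1, t2):
--     if len(t1) != len(t2):
--         raise ValueError(f"Dot Product: {t1} and {t2} do not have the same length.")
--     return sum(a * b for a, b in zip(t1, t2))
--
-- def build_dp_matrix(x, N, d):
--     # Compute only the upper triangle (j >= i); the dot product is commutative,
--     # so every entry (i, j) is the triangle value at (min(i,j), abs(i-j)).
--     tri = [[(1 + dot_product(x[i], x[j])) ** d for j in range(i, N)]
--            for i in range(N)]
--     return [[tri[min(i, j)][abs(i - j)] for j in range(N)] for i in range(N)]
-- ===== Notes on version B (the rewrite author's own statement) =====
-- stated objective: alternative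
-- what changed: B computes only the upper-triangle dot products (j >= i) into a ragged triangle and reads every entry (i,j) back as tri[min(i,j)][abs(i-j)], exploiting symmetry of the dot product, instead of A's full N x N recomputation (half the dot products; speed not verified).
-- outside the precondition, e.g. on build_dp_matrix([[1]], 1, -1): A returns [[0.5]], B returns [[0.5]]; on build_dp_matrix([[1]], 2, 1): A raises IndexError, B raises IndexError; on build_dp_matrix([[1], [2, 3]], 2, 1): A raises ValueError, B raises ValueError
import Mathlib
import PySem

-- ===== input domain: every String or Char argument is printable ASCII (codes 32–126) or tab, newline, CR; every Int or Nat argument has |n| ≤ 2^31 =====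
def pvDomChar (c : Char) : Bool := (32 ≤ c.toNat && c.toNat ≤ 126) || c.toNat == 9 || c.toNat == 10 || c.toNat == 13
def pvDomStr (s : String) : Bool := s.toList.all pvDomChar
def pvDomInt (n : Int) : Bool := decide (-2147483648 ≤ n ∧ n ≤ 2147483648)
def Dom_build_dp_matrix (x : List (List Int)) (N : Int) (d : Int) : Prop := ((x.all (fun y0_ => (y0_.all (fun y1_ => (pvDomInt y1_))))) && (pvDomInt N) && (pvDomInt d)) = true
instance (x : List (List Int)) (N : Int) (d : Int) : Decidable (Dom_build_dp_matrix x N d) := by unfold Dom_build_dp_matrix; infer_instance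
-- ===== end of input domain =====

-- B computes only the upper-triangle dot products and mirrors them via tri[min(i,j)][abs(i-j)],
-- exploiting commutativity of the dot product (half the dot products of A).


-- Python's built-in '**' on ints with nonnegative exponent, ported as binary
-- exponentiation (CPython's own algorithm); a negative d (float result) is outside Pre_.
def pypow (b : Int) (e : Nat) : Int :=
  if h : e = 0 then 1
  else
    let half := pypow (b * b) (e / 2)
    if e % 2 = 1 then half * b else half
decreasing_by exact Nat.div_lt_self (Nat.pos_of_ne_zero h) (by norm_num)

-- ===== PORT A =====
-- dot_product of A: sum over indices of range(len(t1)); the raising branch returns 0 (excluded by Pre_)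
def dotA (t1 t2 : List Int) : Int :=
  if t1.length = t2.length then
    ((List.range t1.length).map (fun i => t1.getD i 0 * t2.getD i 0)).sum
  else 0

def build_dp_matrix (x : List (List Int)) (N : Int) (d : Int) : List (List Int) :=
  (PySem.List.pyRange 0 N 1).foldl (fun matrix i =>
    matrix ++ [(PySem.List.pyRange 0 N 1).foldl (fun line j =>
      line ++ [pypow (1 + dotA (PySem.List.pyGetD x i []) (PySem.List.pyGetD x j [])) d.toNat]) []]) []

-- ===== PORT B =====
-- dot_product of B: zip-based sum (raising branch returns 0, excluded by Pre_)
def dotB (t1 t2 : List Int) : Int :=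
  if t1.length ≠ t2.length then 0
  else ((t1.zip t2).map (fun p => p.1 * p.2)).sum

def build_dp_matrix_alt (x : List (List Int)) (N : Int) (d : Int) : List (List Int) :=
  let tri := (PySem.List.pyRange 0 N 1).map (fun i =>
    (PySem.List.pyRange i N 1).map (fun j =>
      pypow (1 + dotB (PySem.List.pyGetD x i []) (PySem.List.pyGetD x j [])) d.toNat))
  (PySem.List.pyRange 0 N 1).map (fun i =>
    (PySem.List.pyRange 0 N 1).map (fun j =>
      PySem.List.pyGetD (PySem.List.pyGetD tri (min i j) []) (((i - j).natAbs : Int)) 0))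

-- ===== PRECONDITION & SPEC =====
-- Pre_ excludes exactly the inputs where Python A does not return an int matrix:
-- N > len(x) (IndexError), unequal row lengths among the first N rows (ValueError),
-- and negative d with N > 0 (the result would be a float matrix, outside the declared type).
def Pre_build_dp_matrix (x : List (List Int)) (N : Int) (d : Int) : Prop :=
  N ≤ (x.length : Int) ∧ (0 < N → 0 ≤ d) ∧
  ∀ a ∈ x.take N.toNat, ∀ b ∈ x.take N.toNat, a.length = b.length
instance (x : List (List Int)) (N : Int) (d : Int) : Decidable (Pre_build_dp_matrix x N d) := by
  unfold Pre_build_dp_matrix; infer_instance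

def pvWitness_build_dp_matrix : List (List Int) × Int × Int := ([[1, 2], [3, 4]], 2, 2)

def Spec_build_dp_matrix (x : List (List Int)) (N : Int) (d : Int) (out : List (List Int)) : Prop := out = build_dp_matrix_alt x N d
instance (x : List (List Int)) (N : Int) (d : Int) (out : List (List Int)) : Decidable (Spec_build_dp_matrix x N d out) := by unfold Spec_build_dp_matrix; infer_instance

-- ===== CLAIM (what is proved, stated in full; the proofs are below) =====
def Claim_equal_build_dp_matrix : Prop := ∀ (x : List (List Int)) (N : Int) (d : Int), Dom_build_dp_matrix x N d → Pre_build_dp_matrix x N d → Spec_build_dp_matrix x N d (build_dp_matrix x N d)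

-- ===== LEMMAS AND PROOFS =====

-- index-based sum of products equals the zip-based one (equal lengths)
theorem sum_range_getD_eq_zip (t1 t2 : List Int) (h : t1.length = t2.length) :
    ((List.range t1.length).map (fun i => t1.getD i 0 * t2.getD i 0)).sum
      = ((t1.zip t2).map (fun p => p.1 * p.2)).sum := by
  induction t1 generalizing t2 with
  | nil => simp
  | cons a t ih =>
    cases t2 with
    | nil => simp at h
    | cons b s =>
      have h' : t.length = s.length := by simpa using h
      simp only [List.length_cons, List.range_succ_eq_map, List.map_cons, List.map_map,
        List.sum_cons, List.zip_cons_cons, Function.comp_def, List.getD_cons_zero,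
        List.getD_cons_succ]
      rw [ih s h']

-- index-based and zip-based dot products agree
theorem dotA_eq_dotB (t1 t2 : List Int) : dotA t1 t2 = dotB t1 t2 := by
  unfold dotA dotB
  by_cases h : t1.length = t2.length
  · rw [if_pos h, if_neg (by omega : ¬ t1.length ≠ t2.length), sum_range_getD_eq_zip t1 t2 h]
  · rw [if_neg h, if_pos (by omega : t1.length ≠ t2.length)]

-- the zip-based sum of products is commutative
theorem zipsum_comm (t1 t2 : List Int) :
    ((t1.zip t2).map (fun p => p.1 * p.2)).sum = ((t2.zip t1).map (fun p => p.1 * p.2)).sum := by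
  induction t1 generalizing t2 with
  | nil => cases t2 <;> simp
  | cons a t ih =>
    cases t2 with
    | nil => simp
    | cons b s => simp only [List.zip_cons_cons, List.map_cons, List.sum_cons, ih s]; ring

-- the zip-based dot product is commutative
theorem dotB_comm (t1 t2 : List Int) : dotB t1 t2 = dotB t2 t1 := by
  unfold dotB
  by_cases h : t1.length = t2.length
  · rw [if_neg (by omega : ¬ t1.length ≠ t2.length), if_neg (by omega : ¬ t2.length ≠ t1.length),
      zipsum_comm]
  · rw [if_pos (by omega : t1.length ≠ t2.length), if_pos (by omega : t2.length ≠ t1.length)]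

-- the entry B reads from the triangle is the (min,max) dot-product value
theorem tri_lookup (x : List (List Int)) (N d i j : Int)
    (hi : 0 ≤ i) (hiN : i < N) (hj : 0 ≤ j) (hjN : j < N) :
    PySem.List.pyGetD
      (PySem.List.pyGetD ((PySem.List.pyRange 0 N 1).map (fun i =>
        (PySem.List.pyRange i N 1).map (fun j =>
          pypow (1 + dotB (PySem.List.pyGetD x i []) (PySem.List.pyGetD x j [])) d.toNat))) (min i j) [])
      (((i - j).natAbs : Int)) 0
    = pypow (1 + dotB (PySem.List.pyGetD x (min i j) []) (PySem.List.pyGetD x (max i j) [])) d.toNat := by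
  have hm0 : 0 ≤ min i j := le_min hi hj
  have hmN : min i j < N := lt_of_le_of_lt (min_le_left i j) hiN
  rw [PySem.List.pyGetD_map_pyRange_of_nonneg _ N (min i j) [] hm0 hmN]
  rw [PySem.List.pyGetD_map_pyRange_one _ (min i j) N ((i - j).natAbs) 0 (by omega)]
  rw [show min i j + ((i - j).natAbs : Int) = max i j by omega]

-- ===== VERDICT (by name: the statement is the Claim_ definition above) =====
theorem build_dp_matrix_spec : Claim_equal_build_dp_matrix := by
  intro x N d _hDom _hPre
  unfold Spec_build_dp_matrix build_dp_matrix build_dp_matrix_alt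
  rw [PySem.List.foldl_append_singleton_eq_map]
  simp only [List.nil_append]
  refine List.map_congr_left (fun i hi => ?_)
  rw [PySem.List.foldl_append_singleton_eq_map]
  simp only [List.nil_append]
  refine List.map_congr_left (fun j hj => ?_)
  rw [PySem.List.mem_pyRange_one] at hi hj
  rw [tri_lookup x N d i j hi.1 hi.2 hj.1 hj.2]
  rcases le_total i j with h | h
  · rw [min_eq_left h, max_eq_right h, dotA_eq_dotB]
  · rw [min_eq_right h, max_eq_left h, dotA_eq_dotB, dotB_comm]
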